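-- pv_equiv track=rewrite | github.com/tylorbombadil/prime-scale-html-viewer | scripts/cluster_finder.py | find_clusters
-- ===== SOURCE A (Python) =====
-- def find_clusters(segments, threshold=4):
--     clusters = []
--     current_cluster = []
--     for start, end, count in segments:
--         if count >= threshold:
--             if current_cluster:
--                 clusters.append(current_cluster)
--                 current_cluster = []
--         else:
--             current_cluster.append((start, end))
--     if current_cluster:
--         clusters.append(current_cluster)
--     return clusters
-- ===== SOURCE B (Python) =====
-- def find_clusters(segments, threshold=4):
--     # run-splitting: skip high segments, scan each maximal low run as one block
--     def low(seg):
--         start, end, count = seg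
--         return count < threshold
--     clusters = []
--     i, n = 0, len(segments)
--     while i < n:
--         if not low(segments[i]):
--             i += 1
--         else:
--             j = i
--             while j < n and low(segments[j]):
--                 j += 1
--             clusters.append([(s, e) for s, e, c in segments[i:j]])
--             i = j
--     return clusters
-- ===== Notes on version B (the rewrite author's own statement) =====
-- stated objective: alternative
-- what changed: Replaces A's accumulator/flush state machine (a pending current_cluster appended to and flushed on high segments) with a run-splitting scan: skip high segments, and for each maximal consecutive low run emit its cluster in one slice-comprehension, with no pending state.
import Mathlib
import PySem

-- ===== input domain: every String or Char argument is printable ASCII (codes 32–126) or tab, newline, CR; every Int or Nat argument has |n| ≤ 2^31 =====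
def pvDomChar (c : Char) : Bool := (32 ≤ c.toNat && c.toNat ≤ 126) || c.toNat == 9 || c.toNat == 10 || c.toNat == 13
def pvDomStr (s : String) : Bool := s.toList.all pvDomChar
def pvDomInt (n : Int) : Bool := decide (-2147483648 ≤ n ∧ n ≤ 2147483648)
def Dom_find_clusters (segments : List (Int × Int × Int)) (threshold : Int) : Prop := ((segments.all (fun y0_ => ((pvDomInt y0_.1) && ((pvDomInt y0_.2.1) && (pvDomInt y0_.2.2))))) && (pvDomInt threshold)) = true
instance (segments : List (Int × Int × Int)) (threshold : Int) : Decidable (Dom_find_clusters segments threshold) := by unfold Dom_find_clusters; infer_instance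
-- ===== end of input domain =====

-- B replaces the accumulator/flush state machine with a run-splitting scan (alternative decomposition, same cost).

-- ===== PORT A =====
def find_clusters (segments : List (Int × Int × Int)) (threshold : Int) : List (List (Int × Int)) :=
  let st := segments.foldl
    (fun (st : List (List (Int × Int)) × List (Int × Int)) seg =>
      match seg with
      | (start, «end», count) =>
        if threshold ≤ count then
          if st.2 ≠ [] then (st.1 ++ [st.2], []) else st
        else (st.1, st.2 ++ [(start, «end»)]))
    ([], [])
  if st.2 ≠ [] then st.1 ++ [st.2] else st.1

-- ===== PORT B =====
-- B: run-splitting — skip high segments, take each maximal low run as one cluster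
def pvLow (threshold : Int) (seg : Int × Int × Int) : Bool :=
  match seg with
  | (_, _, count) => count < threshold

def pvGo (threshold : Int) : List (Int × Int × Int) → List (List (Int × Int))
  | [] => []
  | seg :: rest =>
    if pvLow threshold seg then
      ((seg :: rest).takeWhile (pvLow threshold)).map (fun s => (s.1, s.2.1)) ::
        pvGo threshold ((seg :: rest).dropWhile (pvLow threshold))
    else
      pvGo threshold rest
termination_by l => l.length
decreasing_by
  · simp only [List.dropWhile_cons, *, if_pos]
    exact Nat.lt_succ_of_le (List.length_dropWhile_le _ _)
  · simp

def find_clusters_alt (segments : List (Int × Int × Int)) (threshold : Int) : List (List (Int × Int)) :=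
  pvGo threshold segments

-- ===== PRECONDITION & SPEC =====
def Spec_find_clusters (segments : List (Int × Int × Int)) (threshold : Int) (out : List (List (Int × Int))) : Prop := out = find_clusters_alt segments threshold
instance (segments : List (Int × Int × Int)) (threshold : Int) (out : List (List (Int × Int))) : Decidable (Spec_find_clusters segments threshold out) := by unfold Spec_find_clusters; infer_instance

-- ===== CLAIM (what is proved, stated in full; the proofs are below) =====
def Claim_equal_find_clusters : Prop := ∀ (segments : List (Int × Int × Int)) (threshold : Int), Dom_find_clusters segments threshold → Spec_find_clusters segments threshold (find_clusters segments threshold)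

-- ===== LEMMAS AND PROOFS =====
-- A's loop body, named for the proof (definitionally equal to the lambda in find_clusters)
def pvStepA (threshold : Int) (st : List (List (Int × Int)) × List (Int × Int))
    (seg : Int × Int × Int) : List (List (Int × Int)) × List (Int × Int) :=
  match seg with
  | (start, «end», count) =>
    if threshold ≤ count then
      if st.2 ≠ [] then (st.1 ++ [st.2], []) else st
    else (st.1, st.2 ++ [(start, «end»)])

-- A's remaining computation given the pending current_cluster cur
def pvH (threshold : Int) (cur : List (Int × Int)) : List (Int × Int × Int) → List (List (Int × Int))
  | [] => if cur = [] then [] else [cur]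
  | seg :: rest =>
    if pvLow threshold seg then
      pvH threshold (cur ++ [(seg.1, seg.2.1)]) rest
    else if cur = [] then pvH threshold [] rest else cur :: pvH threshold [] rest

theorem pvH_foldl (threshold : Int) (l : List (Int × Int × Int))
    (cls : List (List (Int × Int))) (cur : List (Int × Int)) :
    (let st := l.foldl (pvStepA threshold) (cls, cur)
     if st.2 ≠ [] then st.1 ++ [st.2] else st.1) = cls ++ pvH threshold cur l := by
  induction l generalizing cls cur with
  | nil =>
    simp only [List.foldl_nil, pvH]
    by_cases h : cur = [] <;> simp [h]
  | cons seg rest ih =>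
    obtain ⟨s, e, c⟩ := seg
    rw [List.foldl_cons]
    by_cases hc : threshold ≤ c
    · have hlow : ¬ c < threshold := not_lt.mpr hc
      by_cases hcur : cur = []
      · have hstep : pvStepA threshold (cls, cur) (s, e, c) = (cls, cur) := by
          simp [pvStepA, hc, hcur]
        rw [hstep, ih]
        simp [pvH, pvLow, hlow, hcur]
      · have hstep : pvStepA threshold (cls, cur) (s, e, c) = (cls ++ [cur], []) := by
          simp [pvStepA, hc, hcur]
        rw [hstep, ih]
        simp [pvH, pvLow, hlow, hcur]
    · have hlow : c < threshold := lt_of_not_ge hc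
      have hstep : pvStepA threshold (cls, cur) (s, e, c) = (cls, cur ++ [(s, e)]) := by
        simp [pvStepA, hc]
      rw [hstep, ih]
      simp [pvH, pvLow, hlow]

theorem pvH_run (threshold : Int) (l : List (Int × Int × Int)) (cur : List (Int × Int))
    (hcur : cur ≠ []) :
    pvH threshold cur l =
      (cur ++ (l.takeWhile (pvLow threshold)).map (fun s => (s.1, s.2.1))) ::
        pvH threshold [] (l.dropWhile (pvLow threshold)) := by
  induction l generalizing cur with
  | nil => simp [pvH, hcur]
  | cons seg rest ih =>
    by_cases h : pvLow threshold seg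
    · simp only [pvH, h, if_pos, List.takeWhile_cons, List.dropWhile_cons]
      rw [ih _ (by simp)]
      simp
    · simp [pvH, h, hcur]

theorem pvH_go (threshold : Int) (l : List (Int × Int × Int)) :
    pvH threshold [] l = pvGo threshold l := by
  induction hn : l.length using Nat.strong_induction_on generalizing l with
  | _ n ih =>
    match l with
    | [] => simp [pvH, pvGo]
    | seg :: rest =>
      rw [pvGo]
      by_cases h : pvLow threshold seg
      · simp only [pvH, h, if_pos]
        rw [pvH_run _ _ _ (by simp)]
        have hdrop : (rest.dropWhile (pvLow threshold)).length < n := by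
          subst hn
          exact Nat.lt_succ_of_le (List.length_dropWhile_le _ _)
        rw [ih _ hdrop _ rfl]
        simp [h]
      · have hr : rest.length < n := by subst hn; simp
        simp [pvH, h, ih _ hr rest rfl]

-- ===== VERDICT (by name: the statement is the Claim_ definition above) =====
theorem find_clusters_spec : Claim_equal_find_clusters := by
  intro segments threshold _
  show find_clusters segments threshold = find_clusters_alt segments threshold
  have hA : find_clusters segments threshold =
      (let st := segments.foldl (pvStepA threshold) ([], [])
       if st.2 ≠ [] then st.1 ++ [st.2] else st.1) := rfl
  rw [hA, pvH_foldl, pvH_go]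
  rfl
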